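-- pv_equiv track=rewrite | github.com/benedetta-mariani/brain-criticality-project | avalanches.py | binningone
-- ===== SOURCE A (Python) =====
-- def binningone(n):
--     avalanches = []
--     avalanches.append([])
--     j = 0
--     for z in range(len(n)):
--         if n[z] > 0:
--             avalanches[j].append(n[z])
--         else:
--             j = j + 1
--             avalanches.append([])
--
--     for i in range(avalanches.count([])):
--         avalanches.remove([])
--     return avalanches
-- ===== SOURCE B (Python) =====
-- def binningone(n):
--     stops = [i for i, x in enumerate(n) if not x > 0]
--     bounds = [-1] + stops + [len(n)]
--     return [n[a + 1:b] for a, b in zip(bounds, bounds[1:]) if b - a > 1]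
-- ===== Notes on version B (the rewrite author's own statement) =====
-- stated objective: faster
-- what changed: B is a staged index-based algorithm: it first collects the positions of all nonpositive entries, forms a separator-boundary list, and then materialises each run as a slice n[a+1:b] between consecutive boundaries, keeping only non-degenerate gaps; A instead grows sublists element by element and then quadratically erases empty sublists with count/remove.
import Mathlib
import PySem

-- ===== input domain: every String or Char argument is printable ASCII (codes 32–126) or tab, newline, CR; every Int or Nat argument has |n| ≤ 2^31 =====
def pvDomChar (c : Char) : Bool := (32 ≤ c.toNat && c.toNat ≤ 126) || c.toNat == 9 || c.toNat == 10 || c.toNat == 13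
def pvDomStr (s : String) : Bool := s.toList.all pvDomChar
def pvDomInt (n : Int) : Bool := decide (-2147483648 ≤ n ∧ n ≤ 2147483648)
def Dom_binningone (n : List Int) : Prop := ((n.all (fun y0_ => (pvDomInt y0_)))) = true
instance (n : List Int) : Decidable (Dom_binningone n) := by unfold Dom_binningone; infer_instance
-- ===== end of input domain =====

-- B replaces A's element-by-element grouping plus count/remove cleanup by a staged
-- index computation: collect the positions of the nonpositive separators, then slice
-- each run out of n between consecutive boundaries.

-- ===== PORT A =====
-- body of A's first loop: n[z] > 0 appends to avalanches[j], else j += 1 and a new [] is appended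
def pvStepA (st : List (List Int) × Nat) (x : Int) : List (List Int) × Nat :=
  if x > 0 then (st.1.modify st.2 (fun l => l ++ [x]), st.2)
  else (st.1 ++ [[]], st.2 + 1)

-- A's second loop: for i in range(avalanches.count([])): avalanches.remove([])
def pvCleanA (av : List (List Int)) : List (List Int) :=
  (PySem.List.pyRange 0 (av.count []) 1).foldl
    (fun acc _ => (PySem.List.remove? acc ([] : List Int)).getD acc) av

def binningone (n : List Int) : List (List Int) :=
  pvCleanA (n.foldl pvStepA ([[]], 0)).1

-- ===== PORT B =====
-- stops = [i for i, x in enumerate(n) if not x > 0]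
-- bounds = [-1] + stops + [len(n)]
-- return [n[a+1:b] for a, b in zip(bounds, bounds[1:]) if b - a > 1]
def binningone_alt (n : List Int) : List (List Int) :=
  let stops : List Int :=
    ((PySem.List.enumerate n 0).filter (fun p => decide (¬ p.2 > 0))).map Prod.fst
  let bounds : List Int := [-1] ++ stops ++ [(n.length : Int)]
  ((bounds.zip (PySem.List.slice bounds (some 1) none)).filter
      (fun p => decide (p.2 - p.1 > 1))).map
    (fun p => PySem.List.slice n (some (p.1 + 1)) (some p.2))

-- ===== PRECONDITION & SPEC =====
def Spec_binningone (n : List Int) (out : List (List Int)) : Prop := out = binningone_alt n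
instance (n : List Int) (out : List (List Int)) : Decidable (Spec_binningone n out) := by unfold Spec_binningone; infer_instance

-- ===== CLAIM (what is proved, stated in full; the proofs are below) =====
def Claim_equal_binningone : Prop := ∀ (n : List Int), Dom_binningone n → Spec_binningone n (binningone n)

-- ===== LEMMAS AND PROOFS =====

-- the segments (empty ones included) that A's first loop builds
def pvSegs : List Int → List Int → List (List Int)
  | [], cur => [cur]
  | x :: t, cur => if x > 0 then pvSegs t (cur ++ [x]) else cur :: pvSegs t []

lemma pvModify_append_last (g : List (List Int)) (cur : List Int) (f : List Int → List Int) :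
    (g ++ [cur]).modify g.length f = g ++ [f cur] := by
  induction g with
  | nil => rfl
  | cons h t ih => simpa [List.cons_append, List.modify_cons] using ih

lemma pvFoldA (xs : List Int) : ∀ (g : List (List Int)) (cur : List Int),
    xs.foldl pvStepA (g ++ [cur], g.length)
      = (g ++ pvSegs xs cur, g.length + (pvSegs xs cur).length - 1) := by
  induction xs with
  | nil => intro g cur; simp [pvSegs]
  | cons x t ih =>
    intro g cur
    rw [List.foldl_cons]
    by_cases hx : x > 0
    · rw [show pvStepA (g ++ [cur], g.length) x
            = (g ++ [cur ++ [x]], g.length) from by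
          simp [pvStepA, if_pos hx, pvModify_append_last]]
      rw [ih g (cur ++ [x])]
      simp [pvSegs, hx]
    · rw [show pvStepA (g ++ [cur], g.length) x
            = ((g ++ [cur]) ++ [([] : List Int)], (g ++ [cur]).length) from by
          simp [pvStepA, if_neg hx]]
      rw [ih (g ++ [cur]) []]
      simp only [pvSegs, if_neg hx, List.append_assoc, List.singleton_append,
        List.length_append, List.length_cons, List.length_nil, Prod.mk.injEq]
      exact ⟨trivial, by omega⟩

-- folding a constant step over range(0, k) is k-fold iteration
lemma pvFoldRange_iterate (f : List (List Int) → List (List Int)) (k : Nat) (av : List (List Int)) :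
    (PySem.List.pyRange 0 (k : Int) 1).foldl (fun acc _ => f acc) av = f^[k] av := by
  induction k generalizing av with
  | zero => simp
  | succ m ih =>
    rw [show ((m + 1 : Nat) : Int) = (m : Int) + 1 from by push_cast; ring,
        PySem.List.pyRange_one_succ_right (by positivity)]
    simp [List.foldl_append, ih, Function.iterate_succ_apply']

lemma pvFilter_erase_nil (av : List (List Int)) :
    (av.erase []).filter (fun l => !l.isEmpty) = av.filter (fun l => !l.isEmpty) := by
  induction av with
  | nil => rfl
  | cons h t ih =>
    by_cases hh : h = ([] : List Int)
    · subst hh; simp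
    · rw [List.erase_cons_tail (by simpa using hh)]
      simp [List.filter_cons, ih]

lemma pvRemoveAll (k : Nat) : ∀ (av : List (List Int)), av.count [] = k →
    (fun acc => (PySem.List.remove? acc ([] : List Int)).getD acc)^[k] av
      = av.filter (fun l => !l.isEmpty) := by
  induction k with
  | zero =>
    intro av h
    rw [Function.iterate_zero_apply, List.filter_eq_self.mpr]
    intro a ha
    have : a ≠ ([] : List Int) := fun he => by
      subst he; exact absurd (List.count_pos_iff.mpr ha) (by omega)
    simpa [List.isEmpty_iff] using this
  | succ m ih =>
    intro av h
    have hmem : ([] : List Int) ∈ av := by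
      rw [← List.count_pos_iff]; omega
    rw [Function.iterate_succ_apply]
    simp only [PySem.List.remove?_eq_some_erase av _ hmem, Option.getD_some]
    rw [ih (av.erase []) (by rw [List.count_erase_self]; omega)]
    exact pvFilter_erase_nil av

lemma pvCleanA_eq_filter (av : List (List Int)) :
    pvCleanA av = av.filter (fun l => !l.isEmpty) := by
  unfold pvCleanA
  rw [pvFoldRange_iterate (fun acc => (PySem.List.remove? acc ([] : List Int)).getD acc)]
  exact pvRemoveAll (av.count []) av rfl

-- A equals the nonempty segments
lemma pvA_eq_filter (n : List Int) :
    binningone n = (pvSegs n []).filter (fun l => !l.isEmpty) := by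
  unfold binningone
  have hA := pvFoldA n [] []
  simp only [List.nil_append, List.length_nil] at hA
  rw [hA, pvCleanA_eq_filter]

-- ---- B side ----

-- the separator positions, recursively
def pvStops : List Int → Int → List Int
  | [], _ => []
  | x :: t, s => if x > 0 then pvStops t (s + 1) else s :: pvStops t (s + 1)

lemma pvStops_eq (n : List Int) : ∀ (s : Int),
    ((PySem.List.enumerate n s).filter (fun p => decide (¬ p.2 > 0))).map Prod.fst
      = pvStops n s := by
  induction n with
  | nil => intro s; simp [pvStops, PySem.List.enumerate]
  | cons x t ih =>
    intro s
    rw [PySem.List.enumerate_cons]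
    by_cases hx : x > 0
    · rw [List.filter_cons_of_neg (by simp [hx]), ih]
      simp [pvStops, hx]
    · rw [List.filter_cons_of_pos (by simp [hx]), List.map_cons, ih]
      simp [pvStops, hx]

lemma pvStops_shift (n : List Int) : ∀ (s : Int),
    pvStops n s = (pvStops n 0).map (· + s) := by
  induction n with
  | nil => intro s; simp [pvStops]
  | cons x t ih =>
    intro s
    by_cases hx : x > 0
    · simp only [pvStops, if_pos hx, zero_add]
      rw [ih (s + 1), ih 1, List.map_map]
      exact List.map_congr_left (fun a _ => by simp only [Function.comp_apply]; ring)
    · simp only [pvStops, if_neg hx, zero_add]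
      rw [ih (s + 1), ih 1, List.map_cons, List.map_map]
      refine congrArg₂ _ (by ring) ?_
      exact List.map_congr_left (fun a _ => by simp only [Function.comp_apply]; ring)

lemma pvStops_posPrefix (p : List Int) (r : List Int) (hp : ∀ y ∈ p, y > 0) : ∀ (s : Int),
    pvStops (p ++ r) s = pvStops r (s + p.length) := by
  induction p with
  | nil => intro s; simp
  | cons y q ih =>
    intro s
    have hy : y > 0 := hp y (by simp)
    rw [List.cons_append, show pvStops (y :: (q ++ r)) s = pvStops (q ++ r) (s + 1) from by
      simp [pvStops, hy]]
    rw [ih (fun z hz => hp z (by simp [hz])) (s + 1)]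
    congr 1
    simp only [List.length_cons]; push_cast; ring

lemma pvStops_mem (n : List Int) : ∀ (s : Int) (m : Int), m ∈ pvStops n s → s ≤ m := by
  induction n with
  | nil => intro s m h; simp [pvStops] at h
  | cons x t ih =>
    intro s m h
    by_cases hx : x > 0
    · simp only [pvStops, if_pos hx] at h
      have := ih (s + 1) m h; omega
    · simp only [pvStops, if_neg hx, List.mem_cons] at h
      rcases h with h | h
      · omega
      · have := ih (s + 1) m h; omega

-- the core of B, written over pvStops
def pvB (n : List Int) : List (List Int) :=
  (((([-1] ++ pvStops n 0 ++ [(n.length : Int)]).zip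
      (([-1] ++ pvStops n 0 ++ [(n.length : Int)]).tail)).filter
      (fun p : Int × Int => decide (p.2 - p.1 > 1))).map
    (fun p : Int × Int => PySem.List.slice n (some (p.1 + 1)) (some p.2)))

lemma pvAlt_eq_pvB (n : List Int) : binningone_alt n = pvB n := by
  simp only [binningone_alt, pvB, pvStops_eq, PySem.List.slice_from_one]

-- members of bounds are ≥ -1; members of its tail are ≥ 0
lemma pvBounds_tail_nonneg (t : List Int) (b : Int)
    (hb : b ∈ ([-1] ++ pvStops t 0 ++ [(t.length : Int)]).tail) : 0 ≤ b := by
  have hb' : b ∈ pvStops t 0 ∨ b = (t.length : Int) := by simpa using hb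
  rcases hb' with hb' | hb'
  · exact pvStops_mem t 0 b hb'
  · simp [hb']

lemma pvBounds_ge (t : List Int) (a : Int)
    (ha : a ∈ ([-1] ++ pvStops t 0 ++ [(t.length : Int)])) : -1 ≤ a := by
  have ha' : a = -1 ∨ a ∈ pvStops t 0 ∨ a = (t.length : Int) := by simpa using ha
  rcases ha' with ha' | ha' | ha'
  · omega
  · have := pvStops_mem t 0 a ha'; omega
  · have : (0:Int) ≤ a := by simp [ha']
    omega

lemma pvSlice_shift (p : List Int) (x : Int) (t : List Int) (a b : Int)
    (ha : -1 ≤ a) (hb : 0 ≤ b) :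
    PySem.List.slice (p ++ x :: t) (some (a + ((p.length : Int) + 1) + 1)) (some (b + ((p.length : Int) + 1)))
      = PySem.List.slice t (some (a + 1)) (some b) := by
  have h1 : (0 : Int) ≤ a + ((p.length : Int) + 1) + 1 := by omega
  have h2 : (0 : Int) ≤ b + ((p.length : Int) + 1) := by omega
  have h3 : (0 : Int) ≤ a + 1 := by omega
  rw [PySem.List.slice_toNat _ h1 h2, PySem.List.slice_toNat _ h3 hb]
  have e1 : (a + ((p.length : Int) + 1) + 1).toNat = (p ++ [x]).length + (a + 1).toNat := by
    simp only [List.length_append, List.length_cons, List.length_nil]; omega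
  have e2 : (b + ((p.length : Int) + 1)).toNat = b.toNat + (p.length + 1) := by omega
  have hsplit : p ++ x :: t = (p ++ [x]) ++ t := by simp
  rw [e1, e2, hsplit]
  rw [show ((p ++ [x]) ++ t).drop ((p ++ [x]).length + (a + 1).toNat) = t.drop ((a + 1).toNat) from by
    rw [List.drop_append, List.drop_of_length_le (by omega), Nat.add_sub_cancel_left,
      List.nil_append]]
  congr 1
  simp only [List.length_append, List.length_cons, List.length_nil]; omega

-- all-positive case: pvSegs is one segment
lemma pvSegs_pos (n : List Int) (hn : ∀ y ∈ n, y > 0) : ∀ (cur : List Int),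
    pvSegs n cur = [cur ++ n] := by
  induction n with
  | nil => intro cur; simp [pvSegs]
  | cons x t ih =>
    intro cur
    have hx : x > 0 := hn x (by simp)
    rw [show pvSegs (x :: t) cur = pvSegs t (cur ++ [x]) from by simp [pvSegs, hx]]
    rw [ih (fun z hz => hn z (by simp [hz])) (cur ++ [x])]
    simp

lemma pvSegs_split (p : List Int) (x : Int) (t : List Int)
    (hp : ∀ y ∈ p, y > 0) (hx : ¬ x > 0) :
    pvSegs (p ++ x :: t) [] = p :: pvSegs t [] := by
  have h : ∀ (q : List Int) (cur : List Int), (∀ y ∈ q, y > 0) →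
      pvSegs (q ++ x :: t) cur = (cur ++ q) :: pvSegs t [] := by
    intro q
    induction q with
    | nil => intro cur _; simp [pvSegs, hx]
    | cons y r ih =>
      intro cur hq
      have hy : y > 0 := hq y (by simp)
      rw [List.cons_append, show pvSegs (y :: (r ++ x :: t)) cur = pvSegs (r ++ x :: t) (cur ++ [y]) from by
        simp [pvSegs, hy]]
      rw [ih (cur ++ [y]) (fun z hz => hq z (by simp [hz]))]
      simp
  simpa using h p [] hp

-- filter commutes with the shift map on boundary pairs
lemma pvFilter_shift (c : Int) (L : List (Int × Int)) :
    (L.map (Prod.map (· + c) (· + c))).filter (fun q : Int × Int => decide (q.2 - q.1 > 1))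
      = (L.filter (fun q : Int × Int => decide (q.2 - q.1 > 1))).map (Prod.map (· + c) (· + c)) := by
  rw [List.filter_map]
  congr 1
  apply List.filter_congr
  intro q _
  simp only [Function.comp_apply, Prod.map_fst, Prod.map_snd]
  exact decide_eq_decide.mpr (by omega)

lemma pvB_eq_filter (n : List Int) :
    pvB n = (pvSegs n []).filter (fun l => !l.isEmpty) := by
  suffices H : ∀ (N : Nat) (m : List Int), m.length ≤ N →
      pvB m = (pvSegs m []).filter (fun l => !l.isEmpty) from H n.length n le_rfl
  intro N
  induction N with
  | zero =>
    intro m hm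
    have : m = [] := List.eq_nil_of_length_eq_zero (Nat.le_zero.mp hm)
    subst this
    decide
  | succ N ih =>
    intro m hm
    by_cases hall : ∀ y ∈ m, y > 0
    · -- no separator: a single run
      have hstops : pvStops m 0 = [] := by
        have h := pvStops_posPrefix m [] hall 0
        simpa [pvStops] using h
      by_cases hnil : m = []
      · subst hnil; decide
      · have hlp : 0 < m.length := List.length_pos_of_ne_nil hnil
        have hL : decide (((m.length : Int)) - (-1) > 1) = true := by
          simp only [decide_eq_true_eq]; omega
        have h1 : pvB m = [PySem.List.slice m (some (-1 + 1)) (some (m.length : Int))] := by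
          unfold pvB
          rw [hstops]
          show List.map (fun q : Int × Int => PySem.List.slice m (some (q.1 + 1)) (some q.2))
              (List.filter (fun q : Int × Int => decide (q.2 - q.1 > 1))
                [((-1 : Int), (m.length : Int))])
            = [PySem.List.slice m (some (-1 + 1)) (some (m.length : Int))]
          rw [List.filter_cons, hL]
          simp
        rw [h1, show (-1 : Int) + 1 = 0 from by ring]
        rw [pvSegs_pos m hall []]
        simp [PySem.List.slice_to_natCast, hnil]
    · -- there is a separator: split m at its first nonpositive element
      cases d : m.dropWhile (fun y => decide (0 < y)) with
      | nil =>
        exfalso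
        apply hall
        intro y hy
        have hy' : y ∈ m.takeWhile (fun y => decide (0 < y)) := by
          conv at hy => rw [← List.takeWhile_append_dropWhile
            (p := fun y => decide (0 < y)) (l := m)]
          rw [d, List.append_nil] at hy
          exact hy
        simpa using List.mem_takeWhile_imp hy'
      | cons x t =>
        have hp : ∀ y ∈ m.takeWhile (fun y => decide (0 < y)), y > 0 := fun y hy => by
          simpa using List.mem_takeWhile_imp hy
        have hx : ¬ x > 0 := by
          have h := List.head_dropWhile_not (fun y => decide (0 < y)) (l := m)
            (by rw [d]; simp)
          simp only [d] at h
          simpa using h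
        have hn2 : m = m.takeWhile (fun y => decide (0 < y)) ++ x :: t := by
          rw [← d, List.takeWhile_append_dropWhile]
        generalize hpdef : m.takeWhile (fun y => decide (0 < y)) = p at hp hn2
        have hlt : t.length ≤ N := by
          have : m.length = p.length + (t.length + 1) := by rw [hn2]; simp
          omega
        -- abbreviations
        have hstops : pvStops m 0
            = (p.length : Int) :: (pvStops t 0).map (· + ((p.length : Int) + 1)) := by
          rw [hn2, pvStops_posPrefix p _ hp 0]
          rw [show pvStops (x :: t) (0 + (p.length : Int))
              = (p.length : Int) :: pvStops t ((p.length : Int) + 1) from by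
            simp [pvStops, hx]]
          rw [pvStops_shift t ((p.length : Int) + 1)]
        have hLn : ((m.length : Int)) = (t.length : Int) + ((p.length : Int) + 1) := by
          rw [hn2]; push_cast [List.length_append, List.length_cons]; ring
        have hmapbt : (([-1] ++ pvStops t 0 ++ [(t.length : Int)]).map (· + ((p.length : Int) + 1)))
            = (p.length : Int) :: ((pvStops t 0).map (· + ((p.length : Int) + 1)) ++ [(m.length : Int)]) := by
          simp only [List.map_append, List.map_cons, List.map_nil, List.cons_append,
            List.nil_append]
          rw [show (-1 : Int) + ((p.length : Int) + 1) = (p.length : Int) from by ring,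
              show (t.length : Int) + ((p.length : Int) + 1) = (m.length : Int) from hLn.symm]
        have hbounds : [-1] ++ pvStops m 0 ++ [(m.length : Int)]
            = -1 :: (([-1] ++ pvStops t 0 ++ [(t.length : Int)]).map (· + ((p.length : Int) + 1))) := by
          rw [hstops, hmapbt]
          simp
        -- the zip of bounds with its tail
        have hzip : (([-1] ++ pvStops m 0 ++ [(m.length : Int)]).zip
                (([-1] ++ pvStops m 0 ++ [(m.length : Int)]).tail))
            = (-1, (p.length : Int)) ::
              ((([-1] ++ pvStops t 0 ++ [(t.length : Int)]).zip
                  (([-1] ++ pvStops t 0 ++ [(t.length : Int)]).tail)).map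
                (Prod.map (· + ((p.length : Int) + 1)) (· + ((p.length : Int) + 1)))) := by
          rw [hbounds]
          rw [show [-1] ++ pvStops t 0 ++ [(t.length : Int)]
              = -1 :: (pvStops t 0 ++ [(t.length : Int)]) from rfl]
          simp only [List.map_cons, List.tail_cons]
          rw [show (-1 : Int) + ((p.length : Int) + 1) = (p.length : Int) from by ring]
          rw [List.zip_cons_cons]
          congr 1
          rw [← List.zip_map]
          simp only [List.map_cons]
          rw [show (-1 : Int) + ((p.length : Int) + 1) = (p.length : Int) from by ring]
        -- the shifted slices are the slices of t
        have hslices : ∀ q ∈ (([-1] ++ pvStops t 0 ++ [(t.length : Int)]).zip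
                (([-1] ++ pvStops t 0 ++ [(t.length : Int)]).tail)).filter
                (fun q : Int × Int => decide (q.2 - q.1 > 1)),
            ((fun q : Int × Int => PySem.List.slice m (some (q.1 + 1)) (some q.2)) ∘
              (Prod.map (· + ((p.length : Int) + 1)) (· + ((p.length : Int) + 1)))) q
              = PySem.List.slice t (some (q.1 + 1)) (some q.2) := by
          intro q hq
          obtain ⟨a, b⟩ := q
          have hmz := List.of_mem_zip (List.mem_of_mem_filter hq)
          have ha := pvBounds_ge t a hmz.1
          have hb := pvBounds_tail_nonneg t b hmz.2
          simp only [Function.comp_apply, Prod.map_fst, Prod.map_snd]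
          rw [hn2]
          exact pvSlice_shift p x t a b ha hb
        have hB : List.map (fun q : Int × Int => PySem.List.slice t (some (q.1 + 1)) (some q.2))
              ((([-1] ++ pvStops t 0 ++ [(t.length : Int)]).zip
                  (([-1] ++ pvStops t 0 ++ [(t.length : Int)]).tail)).filter
                (fun q : Int × Int => decide (q.2 - q.1 > 1)))
            = (pvSegs t []).filter (fun l => !l.isEmpty) := by
          rw [← ih t hlt]; rfl
        -- compute pvB m
        unfold pvB
        rw [hzip, List.filter_cons, pvFilter_shift]
        by_cases hpnil : p = []
        · subst hpnil
          rw [if_neg (by norm_num)]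
          rw [List.map_map, List.map_congr_left hslices, hB]
          simp only [List.nil_append] at hn2
          rw [hn2, show pvSegs (x :: t) [] = [] :: pvSegs t [] from by simp [pvSegs, hx],
            List.filter_cons]
          simp
        · have hkpos : 0 < p.length := List.length_pos_of_ne_nil hpnil
          rw [if_pos (by simp only [decide_eq_true_eq]; omega)]
          rw [List.map_cons, List.map_map, List.map_congr_left hslices, hB]
          conv_rhs => rw [hn2]
          rw [pvSegs_split p x t hp hx, List.filter_cons, if_pos (by simp [hpnil])]
          congr 1
          show PySem.List.slice m (some ((-1 : Int) + 1)) (some ((p.length : Nat) : Int)) = p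
          rw [show (-1 : Int) + 1 = 0 from by ring]
          simp only [PySem.List.slice_zero_start, PySem.List.slice_to_natCast]
          rw [hn2]
          exact List.take_left ..

-- ===== VERDICT (by name: the statement is the Claim_ definition above) =====
theorem binningone_spec : Claim_equal_binningone := by
  intro n _
  unfold Spec_binningone
  rw [pvA_eq_filter, pvAlt_eq_pvB, pvB_eq_filter]
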